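-- pv_equiv track=rewrite | github.com/SakshiI10/Python-DSA | Strings/25_Uncommon_String.py | UncommonChars
-- ===== SOURCE A (Python) =====
-- def UncommonChars(A, B):
--     countA = {}
--     countB = {}
--
--     # Count frequency of characters in A
--     for char in A:
--         countA[char] = countA.get(char, 0) + 1
--
--     # Count frequency of characters in B
--     for char in B:
--         countB[char] = countB.get(char, 0) + 1
--
--     result = set()
--
--     # Collect uncommon characters from A
--     for char in countA:
--         if char not in countB:
--             result.add(char)
--
--     # Collect uncommon characters from B
--     for char in countB:
--         if char not in countA:
--             result.add(char)
--
--     # Convert set to sorted list and then to string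
--     result = ''.join(sorted(result))
--
--     return result
-- ===== SOURCE B (Python) =====
-- def UncommonChars(A, B):
--     # sort-then-merge: walk the two strictly increasing distinct-char lists in
--     # lockstep, emitting chars present on exactly one side (output is already sorted)
--     def merge(xs, ys):
--         if not xs:
--             return ys
--         if not ys:
--             return xs
--         x, y = xs[0], ys[0]
--         if x < y:
--             return [x] + merge(xs[1:], ys)
--         if y < x:
--             return [y] + merge(xs, ys[1:])
--         return merge(xs[1:], ys[1:])
--     return ''.join(merge(sorted(set(A)), sorted(set(B))))
-- ===== Notes on version B (the rewrite author's own statement) =====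
-- stated objective: alternative
-- what changed: Instead of building two frequency dicts, filtering each through membership in the other and sorting the collected set at the end, B sorts the distinct characters of each string and merges the two strictly increasing lists with two pointers, emitting a char exactly when it appears on one side only; per-character work drops from Python-level dict updates to C-level set()/sorted() plus a merge over at most the alphabet.
import Mathlib
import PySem

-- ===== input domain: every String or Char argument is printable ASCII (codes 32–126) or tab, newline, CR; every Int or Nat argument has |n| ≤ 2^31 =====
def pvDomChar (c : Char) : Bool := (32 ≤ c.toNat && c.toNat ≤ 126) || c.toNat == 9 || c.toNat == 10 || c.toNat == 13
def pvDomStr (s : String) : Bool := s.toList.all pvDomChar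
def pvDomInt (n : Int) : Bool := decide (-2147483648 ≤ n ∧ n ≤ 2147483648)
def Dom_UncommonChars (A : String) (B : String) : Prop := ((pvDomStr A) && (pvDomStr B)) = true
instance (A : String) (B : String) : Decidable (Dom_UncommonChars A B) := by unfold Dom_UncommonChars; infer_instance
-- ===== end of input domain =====

-- B replaces A's frequency dicts, membership-filter loops and final sort by a
-- two-pointer merge of the two sorted distinct-character lists (alternative algorithm).

-- ===== PORT A =====
def UncommonChars (A : String) (B : String) : String :=
  -- countA[char] = countA.get(char, 0) + 1 over A, then over B
  let countA : PySem.Dict Char Int :=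
    A.toList.foldl (fun d c => d.insert c (d.getD c 0 + 1)) PySem.Dict.empty
  let countB : PySem.Dict Char Int :=
    B.toList.foldl (fun d c => d.insert c (d.getD c 0 + 1)) PySem.Dict.empty
  -- for char in countA: if char not in countB: result.add(char)
  let result : PySem.Set Char :=
    countA.keys.foldl (fun s c => if countB.contains c then s else PySem.Set.add s c)
      PySem.Set.empty
  -- for char in countB: if char not in countA: result.add(char)
  let result : PySem.Set Char :=
    countB.keys.foldl (fun s c => if countA.contains c then s else PySem.Set.add s c) result
  -- ''.join(sorted(result))
  String.mk (PySem.List.sorted result (fun c => c) false)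

-- ===== PORT B =====
-- merge(xs, ys): lockstep walk of two strictly increasing lists, keeping the
-- one-sided characters; transliterates Source B's recursive helper
def pvMergeUncommon : List Char → List Char → List Char
  | [], ys => ys
  | x :: xs, [] => x :: xs
  | x :: xs, y :: ys =>
    if x < y then x :: pvMergeUncommon xs (y :: ys)
    else if y < x then y :: pvMergeUncommon (x :: xs) ys
    else pvMergeUncommon xs ys

def UncommonChars_alt (A : String) (B : String) : String :=
  String.mk (pvMergeUncommon
    (PySem.List.sorted (PySem.Set.ofList A.toList) (fun c => c) false)
    (PySem.List.sorted (PySem.Set.ofList B.toList) (fun c => c) false))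

-- ===== PRECONDITION & SPEC =====
def Spec_UncommonChars (A : String) (B : String) (out : String) : Prop := out = UncommonChars_alt A B
instance (A : String) (B : String) (out : String) : Decidable (Spec_UncommonChars A B out) := by unfold Spec_UncommonChars; infer_instance

-- ===== CLAIM (what is proved, stated in full; the proofs are below) =====
def Claim_equal_UncommonChars : Prop := ∀ (A : String) (B : String), Dom_UncommonChars A B → Spec_UncommonChars A B (UncommonChars A B)

-- ===== LEMMAS AND PROOFS =====

/-- A's collection loop: adding the elements of a nodup list `l` that fail `p`
to `init` appends exactly the `p`-failing elements of `l`, provided none of the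
elements it would add is already in `init`. -/
theorem foldl_add_if_eq_append_filter {α : Type} [BEq α] [LawfulBEq α]
    (l : List α) (d : PySem.Dict α Int) (init : PySem.Set α)
    (hl : l.Nodup) (hdisj : ∀ c ∈ l, d.contains c = false → c ∉ init) :
    l.foldl (fun s c => if d.contains c then s else PySem.Set.add s c) init
      = init ++ l.filter (fun c => !d.contains c) := by
  induction l generalizing init with
  | nil => simp
  | cons c l ih =>
    rcases List.nodup_cons.mp hl with ⟨hc, hl'⟩
    rw [List.foldl_cons, List.filter_cons]
    by_cases hp : d.contains c = true
    · rw [if_pos hp]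
      simp only [hp, Bool.not_true, Bool.false_eq_true, if_false]
      exact ih init hl' (fun x hx hpx => hdisj x (List.mem_cons_of_mem _ hx) hpx)
    · have hp' : d.contains c = false := by simpa using hp
      rw [if_neg hp, PySem.Set.add_of_not_mem (hdisj c List.mem_cons_self hp')]
      simp only [hp', Bool.not_false, if_true]
      rw [ih (init ++ [c]) hl' ?_]
      · simp
      · intro x hx hpx
        have hni := hdisj x (List.mem_cons_of_mem _ hx) hpx
        simp only [List.mem_append, List.mem_singleton]
        rintro (h | rfl)
        · exact hni h
        · exact hc hx

theorem pvMergeUncommon_subset (xs ys : List Char) :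
    ∀ c ∈ pvMergeUncommon xs ys, c ∈ xs ∨ c ∈ ys := by
  induction xs, ys using pvMergeUncommon.induct with
  | case1 ys => simp [pvMergeUncommon]
  | case2 x xs => simp [pvMergeUncommon]
  | case3 x xs y ys h ih =>
    intro c hc
    rw [pvMergeUncommon, if_pos h, List.mem_cons] at hc
    rcases hc with rfl | hc
    · simp
    · rcases ih c hc with h1 | h1 <;> simp [h1]
  | case4 x xs y ys h h' ih =>
    intro c hc
    rw [pvMergeUncommon, if_neg h, if_pos h', List.mem_cons] at hc
    rcases hc with rfl | hc
    · simp
    · rcases ih c hc with h1 | h1 <;> simp [h1]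
  | case5 x xs y ys h h' ih =>
    intro c hc
    rw [pvMergeUncommon, if_neg h, if_neg h'] at hc
    rcases ih c hc with h1 | h1 <;> simp [h1]

theorem pvMergeUncommon_pairwise (xs ys : List Char)
    (hx : xs.Pairwise (· < ·)) (hy : ys.Pairwise (· < ·)) :
    (pvMergeUncommon xs ys).Pairwise (· < ·) := by
  induction xs, ys using pvMergeUncommon.induct with
  | case1 ys => simpa [pvMergeUncommon] using hy
  | case2 x xs => simpa [pvMergeUncommon] using hx
  | case3 x xs y ys h ih =>
    rcases List.pairwise_cons.mp hx with ⟨hxall, hx'⟩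
    rcases List.pairwise_cons.mp hy with ⟨hyall, hy'⟩
    rw [pvMergeUncommon, if_pos h]
    refine List.pairwise_cons.mpr ⟨?_, ih hx' hy⟩
    intro c hc
    rcases pvMergeUncommon_subset _ _ c hc with h1 | h1
    · exact hxall c h1
    · rw [List.mem_cons] at h1
      rcases h1 with rfl | h1
      · exact h
      · exact lt_trans h (hyall c h1)
  | case4 x xs y ys h h' ih =>
    rcases List.pairwise_cons.mp hx with ⟨hxall, hx'⟩
    rcases List.pairwise_cons.mp hy with ⟨hyall, hy'⟩
    rw [pvMergeUncommon, if_neg h, if_pos h']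
    refine List.pairwise_cons.mpr ⟨?_, ih hx hy'⟩
    intro c hc
    rcases pvMergeUncommon_subset _ _ c hc with h1 | h1
    · rw [List.mem_cons] at h1
      rcases h1 with rfl | h1
      · exact h'
      · exact lt_trans h' (hxall c h1)
    · exact hyall c h1
  | case5 x xs y ys h h' ih =>
    rw [pvMergeUncommon, if_neg h, if_neg h']
    exact ih (List.pairwise_cons.mp hx).2 (List.pairwise_cons.mp hy).2

set_option maxHeartbeats 1000000 in
theorem pvMergeUncommon_mem (xs ys : List Char)
    (hx : xs.Pairwise (· < ·)) (hy : ys.Pairwise (· < ·)) (c : Char) :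
    c ∈ pvMergeUncommon xs ys ↔ (c ∈ xs ∧ c ∉ ys) ∨ (c ∈ ys ∧ c ∉ xs) := by
  induction xs, ys using pvMergeUncommon.induct with
  | case1 ys => simp [pvMergeUncommon]
  | case2 x xs => simp [pvMergeUncommon]
  | case3 x xs y ys h ih =>
    rcases List.pairwise_cons.mp hx with ⟨hxall, hx'⟩
    rcases List.pairwise_cons.mp hy with ⟨hyall, hy'⟩
    have f1 : c = x → ¬c = y := fun h1 h2 => absurd h (h1 ▸ h2 ▸ lt_irrefl c)
    have f2 : c = x → c ∉ ys := fun h1 hm => lt_asymm h (h1 ▸ hyall c hm)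
    have f3 : c ∈ ys → ¬c = x := fun hm h1 => lt_asymm h (h1 ▸ hyall c hm)
    rw [pvMergeUncommon, if_pos h, List.mem_cons, ih hx' hy]
    simp only [List.mem_cons, not_or]
    tauto
  | case4 x xs y ys h h' ih =>
    rcases List.pairwise_cons.mp hx with ⟨hxall, hx'⟩
    rcases List.pairwise_cons.mp hy with ⟨hyall, hy'⟩
    have f1 : c = y → ¬c = x := fun h1 h2 => absurd h' (h1 ▸ h2 ▸ lt_irrefl c)
    have f2 : c = y → c ∉ xs := fun h1 hm => lt_asymm h' (h1 ▸ hxall c hm)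
    have f3 : c ∈ xs → ¬c = y := fun hm h1 => lt_asymm h' (h1 ▸ hxall c hm)
    rw [pvMergeUncommon, if_neg h, if_pos h', List.mem_cons, ih hx hy']
    simp only [List.mem_cons, not_or]
    tauto
  | case5 x xs y ys h h' ih =>
    have hxy : x = y := le_antisymm (not_lt.mp h') (not_lt.mp h)
    subst hxy
    rcases List.pairwise_cons.mp hx with ⟨hxall, hx'⟩
    rcases List.pairwise_cons.mp hy with ⟨hyall, hy'⟩
    have f1 : c ∈ xs → ¬c = x := fun hm h1 => absurd (hxall c hm) (h1 ▸ lt_irrefl c)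
    have f2 : c ∈ ys → ¬c = x := fun hm h1 => absurd (hyall c hm) (h1 ▸ lt_irrefl c)
    rw [pvMergeUncommon, if_neg h, if_neg h', ih hx' hy']
    simp only [List.mem_cons, not_or]
    tauto

-- ===== VERDICT (by name: the statement is the Claim_ definition above) =====
theorem UncommonChars_spec : Claim_equal_UncommonChars := by
  intro A B _
  show UncommonChars A B = UncommonChars_alt A B
  simp only [UncommonChars, UncommonChars_alt]
  rw [PySem.Dict.foldl_insert_getD_add_one_eq_counter A.toList,
      PySem.Dict.foldl_insert_getD_add_one_eq_counter B.toList,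
      PySem.Dict.keys_counter, PySem.Dict.keys_counter]
  rw [foldl_add_if_eq_append_filter (PySem.Set.ofList A.toList)
        (PySem.Dict.counter B.toList) PySem.Set.empty
        (PySem.Set.nodup_ofList _) (by intro c _ _ h; simp [PySem.Set.empty] at h)]
  rw [foldl_add_if_eq_append_filter (PySem.Set.ofList B.toList)
        (PySem.Dict.counter A.toList) _
        (PySem.Set.nodup_ofList _) ?hd]
  case hd =>
    intro c hc hpc
    simp only [PySem.Set.empty, List.nil_append, List.mem_filter]
    rintro ⟨hmem, _⟩
    have : c ∈ A.toList := (PySem.Set.mem_ofList _ _).mp hmem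
    rw [PySem.Dict.contains_counter] at hpc
    simp [List.contains_eq_mem, this] at hpc
  simp only [PySem.Set.empty, List.nil_append]
  congr 1
  -- both sides are strictly increasing rearrangements of the same character set
  have hpA := PySem.List.sorted_ofList_pairwise_lt (xs := A.toList)
  have hpB := PySem.List.sorted_ofList_pairwise_lt (xs := B.toList)
  have hmA : ∀ c : Char,
      c ∈ PySem.List.sorted (PySem.Set.ofList A.toList) (fun c => c) false ↔ c ∈ A.toList := by
    intro c; rw [PySem.List.mem_sorted]; exact PySem.Set.mem_ofList _ _
  have hmB : ∀ c : Char,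
      c ∈ PySem.List.sorted (PySem.Set.ofList B.toList) (fun c => c) false ↔ c ∈ B.toList := by
    intro c; rw [PySem.List.mem_sorted]; exact PySem.Set.mem_ofList _ _
  have hmerge_mem := pvMergeUncommon_mem _ _ hpA hpB
  have hmerge_pw := pvMergeUncommon_pairwise _ _ hpA hpB
  have hmerge_nodup : (pvMergeUncommon
      (PySem.List.sorted (PySem.Set.ofList A.toList) (fun c => c) false)
      (PySem.List.sorted (PySem.Set.ofList B.toList) (fun c => c) false)).Nodup :=
    hmerge_pw.imp ne_of_lt
  have hL_nodup : ((PySem.Set.ofList A.toList).filter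
        (fun c => !(PySem.Dict.counter B.toList).contains c) ++
      (PySem.Set.ofList B.toList).filter
        (fun c => !(PySem.Dict.counter A.toList).contains c)).Nodup := by
    refine List.Nodup.append ((PySem.Set.nodup_ofList _).filter _)
      ((PySem.Set.nodup_ofList _).filter _) ?_
    intro c hc1 hc2
    rw [List.mem_filter] at hc1 hc2
    rcases hc1 with ⟨_, hnb⟩
    rcases hc2 with ⟨hb, _⟩
    rw [PySem.Dict.contains_counter] at hnb
    have : c ∈ B.toList := (PySem.Set.mem_ofList _ _).mp hb
    simp [List.contains_eq_mem, this] at hnb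
  refine PySem.List.sorted_eq_of_perm_of_pairwise_lt _ _ _ ?_ hmerge_pw
  refine (List.perm_ext_iff_of_nodup hmerge_nodup hL_nodup).mpr ?_
  intro c
  rw [hmerge_mem c, List.mem_append, List.mem_filter, List.mem_filter]
  simp only [PySem.Dict.contains_counter, List.contains_eq_mem,
    PySem.Set.mem_ofList, Bool.not_eq_eq_eq_not, Bool.not_true, decide_eq_false_iff_not,
    hmA, hmB]
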